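-- pv_equiv track=rewrite | github.com/qec-codes/QuantumThreatTracker | src/quantumthreattracker/algorithms/rsa/chevignard/modular_multi_product.py | addition_sequence
-- ===== SOURCE A (Python) =====
-- def addition_sequence(nb_inputs):
--     """
--     Determine the structure of a tree of additions when we start from a given
--     number of inputs.
--     """
--     current_regs = [i for i in range(nb_inputs)]
--     res = []
--     current_level = 0
--     while len(current_regs) > 1:
--         new_regs = []
--         current_level += 1
--         for i in range(len(current_regs) // 2):
--             res.append((current_regs[2 * i], current_regs[2 * i + 1],
--                         current_regs[2 * i], current_level))
--             new_regs.append(current_regs[2 * i])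
--         if len(current_regs) % 2 == 1:
--             new_regs.append(current_regs[-1])
--         current_regs = new_regs
--     return res
-- ===== SOURCE B (Python) =====
-- def addition_sequence(nb_inputs):
--     """
--     Determine the structure of a tree of additions when we start from a given
--     number of inputs.
--
--     Survivor registers after k merge levels are exactly range(0, nb_inputs, 2**k),
--     so register indices are computed arithmetically instead of maintaining a list;
--     the result (exactly nb_inputs - 1 merges) is preallocated and filled in place.
--     """
--     res = [None] * (nb_inputs - 1)
--     k = 0
--     step = 1
--     level = 0
--     while step < nb_inputs:
--         level += 1
--         count = -(-nb_inputs // step)  # number of surviving registers at this level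
--         for i in range(count // 2):
--             r = 2 * i * step
--             res[k] = (r, r + step, r, level)
--             k += 1
--         step *= 2
--     return res
-- ===== Notes on version B (the rewrite author's own statement) =====
-- stated objective: alternative
-- what changed: B never builds or rebuilds the register list: survivors after k levels are exactly range(0, nb_inputs, 2**k), so each pair's indices are computed by power-of-two arithmetic from a doubling step counter, and the result (exactly nb_inputs - 1 merges) is preallocated and filled by a running index.
import Mathlib
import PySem

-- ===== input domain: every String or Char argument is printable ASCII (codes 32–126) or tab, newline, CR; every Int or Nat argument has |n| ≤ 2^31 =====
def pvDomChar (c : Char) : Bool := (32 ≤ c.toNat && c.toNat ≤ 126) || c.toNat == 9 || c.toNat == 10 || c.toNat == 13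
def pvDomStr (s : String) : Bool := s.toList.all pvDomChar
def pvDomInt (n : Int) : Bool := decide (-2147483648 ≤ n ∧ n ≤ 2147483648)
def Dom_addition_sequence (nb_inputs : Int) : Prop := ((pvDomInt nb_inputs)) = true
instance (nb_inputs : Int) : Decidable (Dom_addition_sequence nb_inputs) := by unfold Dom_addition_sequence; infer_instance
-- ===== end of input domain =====

-- B computes register indices by power-of-two arithmetic (doubling step) instead of
-- maintaining and halving a register list; objective: alternative decomposition.

-- ===== PORT A =====
-- one iteration of A's while-loop, recursing on the shrinking register list;
-- new_regs = kept left elements ++ (the last element if the length is odd)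
def addSeqLoop (regs : List Int) (level : Int) : List (Int × Int × Int × Int) :=
  if 1 < regs.length then
    -- inner for-loop over range(len(regs)//2): indices 2*i and 2*i+1 are always in range
    ((List.range (regs.length / 2)).map
      (fun i => (regs.getD (2 * i) 0, regs.getD (2 * i + 1) 0, regs.getD (2 * i) 0, level + 1)))
    ++ addSeqLoop
        (((List.range (regs.length / 2)).map (fun i => regs.getD (2 * i) 0))
          -- current_regs[-1]: regs is nonempty here, so [-1] is the last element
          ++ (if regs.length % 2 = 1 then [regs.getD (regs.length - 1) 0] else []))
        (level + 1)
  else []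
termination_by regs.length
decreasing_by
  simp only [List.length_append, List.length_map, List.length_range]
  split <;> simp <;> omega

def addition_sequence (nb_inputs : Int) : List (Int × Int × Int × Int) :=
  addSeqLoop ((List.range nb_inputs.toNat).map (fun (i : Nat) => ((i : Int)))) 0

-- ===== PORT B =====
def addSeqAltLoop (n : Int) (step : Int) (level : Int)
    (res : List (Int × Int × Int × Int)) (k : Nat) (hs : 0 < step) :
    List (Int × Int × Int × Int) :=
  if h : step < n then
    -- count = -(-n // step) surviving registers; fill count // 2 slots res[k+i], double step
    addSeqAltLoop n (step * 2) (level + 1)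
      ((List.range (PySem.Int.floordiv (-(PySem.Int.floordiv (-n) step)) 2).toNat).foldl
        (fun r (i : Nat) => r.set (k + i)
          (2 * (i : Int) * step, 2 * (i : Int) * step + step, 2 * (i : Int) * step, level + 1))
        res)
      (k + (PySem.Int.floordiv (-(PySem.Int.floordiv (-n) step)) 2).toNat)
      (by omega)
  else res
termination_by (n - step).toNat
decreasing_by omega

def addition_sequence_alt (nb_inputs : Int) : List (Int × Int × Int × Int) :=
  -- res = [None] * (nb_inputs - 1): the None placeholder is ported as a dummy tuple;
  -- every slot is overwritten before the loop ends (proved by the bridge lemmas below)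
  addSeqAltLoop nb_inputs 1 0 (List.replicate (nb_inputs - 1).toNat (0, 0, 0, 0)) 0 (by omega)

-- ===== PRECONDITION & SPEC =====
def Spec_addition_sequence (nb_inputs : Int) (out : List (Int × Int × Int × Int)) : Prop := out = addition_sequence_alt nb_inputs
instance (nb_inputs : Int) (out : List (Int × Int × Int × Int)) : Decidable (Spec_addition_sequence nb_inputs out) := by unfold Spec_addition_sequence; infer_instance

-- ===== CLAIM (what is proved, stated in full; the proofs are below) =====
def Claim_equal_addition_sequence : Prop := ∀ (nb_inputs : Int), Dom_addition_sequence nb_inputs → Spec_addition_sequence nb_inputs (addition_sequence nb_inputs)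

-- ===== LEMMAS AND PROOFS =====

-- survivors after some levels: m registers spaced s apart
def survivors (m : Nat) (s : Int) : List Int := (List.range m).map (fun (i : Nat) => ((i : Int) * s))

-- ceiling division as a Nat
def ceilN (n s : Int) : Nat := (-(PySem.Int.floordiv (-n) s)).toNat

lemma ceilN_spec (n s : Int) (hs : 0 < s) (hn : 0 < n) :
    ((ceilN n s : Int) - 1) * s < n ∧ n ≤ (ceilN n s : Int) * s := by
  have h := (PySem.Int.neg_floordiv_neg_eq_iff_of_pos (a := n) (b := s) hs
      (q := -(PySem.Int.floordiv (-n) s))).mp rfl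
  have hpos : 0 < -(PySem.Int.floordiv (-n) s) := by nlinarith [h.1, h.2]
  have he : ((ceilN n s : Int)) = -(PySem.Int.floordiv (-n) s) := by
    unfold ceilN; omega
  rw [he]; exact h

lemma survivors_length (m : Nat) (s : Int) : (survivors m s).length = m := by
  simp [survivors]

lemma survivors_getD (m : Nat) (s : Int) (i : Nat) (h : i < m) :
    (survivors m s).getD i 0 = (i : Int) * s := by
  unfold survivors
  rw [List.getD_eq_getElem?_getD, List.getElem?_map]
  simp [h]

lemma addSeqLoop_nil_of_le_one (m : Nat) (s : Int) (lvl : Int) (h : m ≤ 1) :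
    addSeqLoop (survivors m s) lvl = [] := by
  rw [addSeqLoop.eq_def, survivors_length, if_neg (by omega)]

-- one unfolding of A's loop on a survivor list, re-expressed as a survivor list
lemma addSeqLoop_step (m : Nat) (s lvl : Int) (hm : 1 < m) :
    addSeqLoop (survivors m s) lvl =
      ((List.range (m / 2)).map
        (fun (i : Nat) => ((2 * (i : Int) * s, 2 * (i : Int) * s + s, 2 * (i : Int) * s, lvl + 1))))
      ++ addSeqLoop (survivors ((m + 1) / 2) (s * 2)) (lvl + 1) := by
  rw [addSeqLoop.eq_def, survivors_length, if_pos (by omega)]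
  have hpair : ∀ i ∈ List.range (m / 2),
      ((survivors m s).getD (2 * i) 0, (survivors m s).getD (2 * i + 1) 0,
        (survivors m s).getD (2 * i) 0, lvl + 1)
      = ((2 * (i : Int) * s, 2 * (i : Int) * s + s, 2 * (i : Int) * s, lvl + 1)) := by
    intro i hi
    rw [List.mem_range] at hi
    rw [survivors_getD m s _ (by omega), survivors_getD m s _ (by omega)]
    push_cast; ring_nf
  have hnew :
      (((List.range (m / 2)).map (fun i => (survivors m s).getD (2 * i) 0))
        ++ (if m % 2 = 1 then [(survivors m s).getD (m - 1) 0] else []))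
      = survivors ((m + 1) / 2) (s * 2) := by
    have hmap : (List.range (m / 2)).map (fun i => (survivors m s).getD (2 * i) 0)
        = (List.range (m / 2)).map (fun (i : Nat) => ((i : Int) * (s * 2))) := by
      apply List.map_congr_left
      intro i hi
      rw [List.mem_range] at hi
      rw [survivors_getD m s _ (by omega)]
      push_cast; ring
    by_cases hpar : m % 2 = 1
    · rw [if_pos hpar, hmap, survivors_getD m s _ (by omega)]
      have h2 : (m + 1) / 2 = m / 2 + 1 := by omega
      have h3 : ((m - 1 : Nat) : Int) * s = ((m / 2 : Nat) : Int) * (s * 2) := by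
        have hodd : (m : Nat) - 1 = 2 * (m / 2) := by omega
        rw [hodd]; push_cast; ring
      rw [h3, h2]
      unfold survivors
      rw [List.range_succ, List.map_append, List.map_cons, List.map_nil]
    · rw [if_neg hpar, hmap, List.append_nil]
      have h2 : (m + 1) / 2 = m / 2 := by omega
      rw [h2]; rfl
  rw [List.map_congr_left hpair, hnew]

-- ceiling-of-half composition: ceil(n / (2s)) = (ceil(n/s) + 1) / 2
lemma ceilN_double (n s : Int) (hs : 0 < s) (hn : 0 < n) :
    ceilN n (s * 2) = (ceilN n s + 1) / 2 := by
  obtain ⟨h1, h2⟩ := ceilN_spec n s hs hn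
  obtain ⟨h3, h4⟩ := ceilN_spec n (s * 2) (by omega) hn
  set a := ceilN n s with ha
  set b := ceilN n (s * 2) with hb
  by_contra hne
  have hcases : (b : Int) ≤ ((a + 1) / 2 : Nat) - 1 ∨ (((a + 1) / 2 : Nat) : Int) + 1 ≤ (b : Int) := by
    push_cast; omega
  rcases hcases with hlt | hgt
  · have hle : (b : Int) * (s * 2) ≤ ((a : Int) - 1) * s := by
      have hb2 : 2 * (b : Int) ≤ (a : Int) - 1 := by
        have : 2 * (((a + 1) / 2 : Nat) : Int) - 2 ≤ (a : Int) - 1 := by push_cast; omega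
        omega
      nlinarith
    linarith
  · have hle : (a : Int) * s ≤ ((b : Int) - 1) * (s * 2) := by
      have hb2 : (a : Int) ≤ 2 * ((b : Int) - 1) := by
        have : (a : Int) ≤ 2 * (((a + 1) / 2 : Nat) : Int) := by push_cast; omega
        omega
      nlinarith
    linarith

lemma ceilN_le_one_iff (n s : Int) (hs : 0 < s) (hn : 0 < n) :
    ceilN n s ≤ 1 ↔ n ≤ s := by
  obtain ⟨h1, h2⟩ := ceilN_spec n s hs hn
  constructor
  · intro h
    have hc : (ceilN n s : Int) ≤ 1 := by exact_mod_cast h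
    nlinarith
  · intro h
    by_contra hc
    have h2' : (2 : Int) ≤ (ceilN n s : Int) := by omega
    nlinarith

-- filling consecutive slots k, k+1, … of a preallocated list is take/map/drop surgery
lemma fold_set (f : Nat → (Int × Int × Int × Int)) (res : List (Int × Int × Int × Int))
    (k half : Nat) (h : k + half ≤ res.length) :
    (List.range half).foldl (fun r (i : Nat) => r.set (k + i) (f i)) res
      = res.take k ++ (List.range half).map f ++ res.drop (k + half) := by
  induction half with
  | zero => simp [List.take_append_drop]
  | succ half ih =>
    rw [List.range_succ, List.foldl_append, ih (by omega)]
    simp only [List.foldl_cons, List.foldl_nil, List.map_append, List.map_cons,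
      List.map_nil]
    have hk : (res.take k).length = k := by simp; omega
    have hmap : ((List.range half).map f).length = half := by simp
    rw [List.append_assoc, List.set_append, if_neg (by omega), hk]
    rw [List.set_append, if_neg (by omega), hmap]
    have hdrop : (res.drop (k + half)).set (k + half - k - half) (f half)
        = f half :: res.drop (k + half + 1) := by
      have hlt : k + half < res.length := by omega
      have hne : res.drop (k + half) ≠ [] := by
        intro hc
        have := List.drop_eq_nil_iff.mp hc
        omega
      obtain ⟨x, xs, hx⟩ := List.exists_cons_of_ne_nil hne
      have hxs : xs = res.drop (k + half + 1) := by
        have := congrArg List.tail hx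
        simpa [List.tail_drop] using this.symm
      simp [hx, hxs, List.set_cons_zero]
    rw [hdrop]
    simp [List.append_assoc]
    omega

-- main bridge: B's arithmetic fill of the preallocated list equals A's loop output
lemma main_bridge (n : Int) (hn : 0 < n) :
    ∀ (k' : Nat) (s lvl : Int) (hs : 0 < s) (res : List (Int × Int × Int × Int)) (k : Nat),
      (n - s).toNat ≤ k' → res.length = k + (ceilN n s - 1) →
      addSeqAltLoop n s lvl res k hs = res.take k ++ addSeqLoop (survivors (ceilN n s) s) lvl := by
  intro k'
  induction k' with
  | zero =>
    intro s lvl hs res k hk hlen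
    have hns : n ≤ s := by omega
    have hm : ceilN n s ≤ 1 := (ceilN_le_one_iff n s hs hn).mpr hns
    rw [addSeqAltLoop, dif_neg (by omega), addSeqLoop_nil_of_le_one _ _ _ hm,
      List.append_nil, List.take_of_length_le (by omega)]
  | succ k' ih =>
    intro s lvl hs res k hk hlen
    by_cases h : s < n
    · have hm : 1 < ceilN n s := by
        have := (ceilN_le_one_iff n s hs hn)
        omega
      have hcount : (-(PySem.Int.floordiv (-n) s)) = (ceilN n s : Int) := by
        have := ceilN_spec n s hs hn
        unfold ceilN at *
        omega
      have hhalf : (PySem.Int.floordiv (-(PySem.Int.floordiv (-n) s)) 2).toNat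
          = ceilN n s / 2 := by
        rw [hcount, PySem.Int.floordiv_eq_ediv_of_pos (by omega)]
        omega
      rw [addSeqAltLoop, dif_pos h]
      simp only [hhalf]
      set m := ceilN n s with hmdef
      rw [fold_set (fun (i : Nat) =>
        (2 * (i : Int) * s, 2 * (i : Int) * s + s, 2 * (i : Int) * s, lvl + 1)) res k (m / 2)
        (by omega)]
      rw [ih (s * 2) (lvl + 1) (by omega) _ (k + m / 2) (by omega)
        (by
          simp only [List.length_append, List.length_take, List.length_map, List.length_range,
            List.length_drop]
          rw [ceilN_double n s hs hn]
          omega)]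
      rw [ceilN_double n s hs hn]
      have htake : ((res.take k ++ (List.range (m / 2)).map (fun (i : Nat) =>
            (2 * (i : Int) * s, 2 * (i : Int) * s + s, 2 * (i : Int) * s, lvl + 1)))
            ++ res.drop (k + m / 2)).take (k + m / 2)
          = res.take k ++ (List.range (m / 2)).map (fun (i : Nat) =>
            (2 * (i : Int) * s, 2 * (i : Int) * s + s, 2 * (i : Int) * s, lvl + 1)) :=
        List.take_left' (by simp; omega)
      rw [htake, addSeqLoop_step m s lvl hm]
      simp only [← hmdef]
      simp [List.append_assoc]
    · have hns : n ≤ s := by omega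
      have hm : ceilN n s ≤ 1 := (ceilN_le_one_iff n s hs hn).mpr hns
      rw [addSeqAltLoop, dif_neg h, addSeqLoop_nil_of_le_one _ _ _ hm,
        List.append_nil, List.take_of_length_le (by omega)]

lemma survivors_one (n : Int) :
    survivors n.toNat 1 = (List.range n.toNat).map (fun (i : Nat) => ((i : Int))) := by
  unfold survivors
  simp

lemma ceilN_one (n : Int) (hn : 0 < n) : ceilN n 1 = n.toNat := by
  have := ceilN_spec n 1 (by omega) hn
  omega

-- ===== VERDICT (by name: the statement is the Claim_ definition above) =====
theorem addition_sequence_spec : Claim_equal_addition_sequence := by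
  intro n _
  unfold Spec_addition_sequence addition_sequence addition_sequence_alt
  by_cases hn : 0 < n
  · rw [main_bridge n hn (n - 1).toNat 1 0 (by omega) _ 0 (by omega)
      (by simp [ceilN_one n hn])]
    rw [ceilN_one n hn, survivors_one]
    simp
  · -- n ≤ 0: A's list is empty, B's preallocated list is empty and its loop does not start
    rw [addSeqAltLoop, dif_neg (by omega)]
    have h0 : n.toNat = 0 := by omega
    have h1 : (n - 1).toNat = 0 := by omega
    rw [h0, h1]
    rw [addSeqLoop.eq_def]
    simp
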